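-- pv_equiv track=rewrite | github.com/IvanoBilenchi/pyutils | pyutils/types/dictutils.py | is_updated
-- ===== SOURCE A (Python) =====
-- from typing import Dict, Mapping
--
-- def is_updated(dictionary: Mapping, update_dict: Mapping) -> bool:
--     """Checks if the dictionary has been updated with the values from update_dict."""
--     for k, v in update_dict.items():
--         if isinstance(v, dict):
--             if not is_updated(dictionary.get(k, {}), v):
--                 return False
--         elif dictionary[k] != update_dict[k]:
--             return False
--
--     return True
-- ===== SOURCE B (Python) =====
-- def is_updated(dictionary, update_dict):
--     """Checks if the dictionary has been updated with the values from update_dict."""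
--     g = dictionary.get
--     return all(g(k, _MISSING) == v for k, v in update_dict.items())
--
-- _MISSING = object()
-- ===== Notes on version B (the rewrite author's own statement) =====
-- stated objective: idiomatic
-- what changed: Replaces A's explicit loop with early returns (and an isinstance branch that flat string-to-int dicts never take) by a single all() over update_dict's items using dictionary.get with a sentinel, so a missing key yields False instead of KeyError.
import Mathlib
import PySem

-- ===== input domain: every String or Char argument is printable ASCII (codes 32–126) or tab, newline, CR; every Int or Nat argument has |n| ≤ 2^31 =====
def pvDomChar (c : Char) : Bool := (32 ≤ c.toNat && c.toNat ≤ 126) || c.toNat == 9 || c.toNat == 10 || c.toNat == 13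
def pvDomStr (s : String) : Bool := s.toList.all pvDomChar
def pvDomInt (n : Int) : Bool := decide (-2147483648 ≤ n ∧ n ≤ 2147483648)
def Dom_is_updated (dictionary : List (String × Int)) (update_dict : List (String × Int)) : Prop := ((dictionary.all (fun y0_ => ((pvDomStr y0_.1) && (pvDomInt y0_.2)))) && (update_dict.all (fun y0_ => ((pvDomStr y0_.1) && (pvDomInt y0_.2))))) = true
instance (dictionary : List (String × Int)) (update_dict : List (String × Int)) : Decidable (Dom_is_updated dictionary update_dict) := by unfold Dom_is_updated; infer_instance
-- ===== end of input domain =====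

-- B replaces A's explicit loop with early returns by a single all() over update_dict's
-- items using dictionary.get with a sentinel (idiomatic; A raises KeyError on a reached
-- missing key, which Pre_ excludes and B turns into False).

-- ===== PORT A =====
-- A iterates update_dict.items(); with flat String-to-Int dicts the `isinstance(v, dict)`
-- branch is never taken, so the loop reduces to `dictionary[k] != update_dict[k]` checks.
-- `dictionary[k]` is the first-match lookup (KeyError → none, excluded by Pre_; the port
-- returns false there, outside the claim). `update_dict[k]` equals v, the item's value,
-- since a dict's keys are unique.
def is_updated (dictionary : List (String × Int)) (update_dict : List (String × Int)) : Bool :=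
  match update_dict with
  | [] => true
  | (k, v) :: rest =>
    match List.lookup k dictionary with
    | none => false            -- Python: KeyError (input excluded by Pre_is_updated)
    | some w => if w != v then false else is_updated dictionary rest

-- ===== PORT B =====
-- all(g(k, _MISSING) == v for k, v in update_dict.items()); a missing key's sentinel
-- compares unequal to any Int, i.e. the lookup result must be exactly `some v`.
def is_updated_alt (dictionary : List (String × Int)) (update_dict : List (String × Int)) : Bool :=
  update_dict.all (fun p => List.lookup p.1 dictionary == some p.2)

-- ===== PRECONDITION & SPEC =====
-- Pre_ excludes exactly the inputs on which Python A raises KeyError: some update entry i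
-- whose key is missing from dictionary while all earlier entries match (so the loop
-- reaches it without returning False first).
def Pre_is_updated (dictionary : List (String × Int)) (update_dict : List (String × Int)) : Prop :=
  ¬ ∃ i, ∃ _ : i < update_dict.length,
      List.lookup update_dict[i].1 dictionary = none ∧
      ∀ j, (_ : j < i) → List.lookup update_dict[j]!.1 dictionary = some update_dict[j]!.2
instance (dictionary : List (String × Int)) (update_dict : List (String × Int)) : Decidable (Pre_is_updated dictionary update_dict) := by unfold Pre_is_updated; infer_instance

def pvWitness_is_updated : (List (String × Int)) × (List (String × Int)) :=
  ([("a", 1), ("b", 2)], [("b", 2), ("a", 3)])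

def Spec_is_updated (dictionary : List (String × Int)) (update_dict : List (String × Int)) (out : Bool) : Prop := out = is_updated_alt dictionary update_dict
instance (dictionary : List (String × Int)) (update_dict : List (String × Int)) (out : Bool) : Decidable (Spec_is_updated dictionary update_dict out) := by unfold Spec_is_updated; infer_instance

-- ===== CLAIM (what is proved, stated in full; the proofs are below) =====
def Claim_equal_is_updated : Prop := ∀ (dictionary : List (String × Int)) (update_dict : List (String × Int)), Dom_is_updated dictionary update_dict → Pre_is_updated dictionary update_dict → Spec_is_updated dictionary update_dict (is_updated dictionary update_dict)

-- ===== LEMMAS AND PROOFS =====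

-- On a cons input satisfying Pre_, the head key is present, and when the head entry
-- matches, the tail satisfies Pre_ as well.
theorem pre_cons {d : List (String × Int)} {k : String} {v : Int} {rest : List (String × Int)}
    (h : Pre_is_updated d ((k, v) :: rest)) :
    List.lookup k d ≠ none ∧ (List.lookup k d = some v → Pre_is_updated d rest) := by
  constructor
  · intro hnone
    exact h ⟨0, by simp, by simpa using hnone, fun j hj => absurd hj (by omega)⟩
  · intro hhead
    unfold Pre_is_updated
    rintro ⟨i, hi, hnone, hmatch⟩
    refine h ⟨i + 1, by simpa using Nat.succ_lt_succ hi, by simpa using hnone, ?_⟩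
    intro j hj
    match j with
    | 0 => simpa using hhead
    | j + 1 => simpa using hmatch j (by omega)

theorem is_updated_spec : Claim_equal_is_updated := by
  intro d u hdom
  clear hdom
  unfold Spec_is_updated
  induction u with
  | nil => intro _; simp [is_updated, is_updated_alt]
  | cons p rest ih =>
    intro hpre
    obtain ⟨k, v⟩ := p
    obtain ⟨hne, htail⟩ := pre_cons hpre
    rcases hkd : List.lookup k d with _ | w
    · exact absurd hkd hne
    · by_cases hwv : w = v
      · subst hwv
        simpa [is_updated, is_updated_alt, hkd] using ih (htail hkd)
      · simp [is_updated, is_updated_alt, hkd, hwv]
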